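-- pv_equiv track=rewrite | github.com/billybjork/billybjork.com | routers/test.py | _select_rgbd_resolution
-- ===== SOURCE A (Python) =====
-- DEFAULT_TEST_RESOLUTION_WIDTH = 640
--
-- DEFAULT_TEST_RESOLUTION_HEIGHT = 360
--
-- def _select_rgbd_resolution(resolutions: dict) -> tuple[str, dict] | None:
--     """Pick the best available atlas resolution for the current test runtime."""
--     candidates: list[tuple[tuple[int, int, int, int, int], str, dict]] = []
--     for key, value in resolutions.items():
--         if not isinstance(key, str) or not isinstance(value, dict):
--             continue
--         frame_width = value.get("frame_width")
--         frame_height = value.get("frame_height")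
--         if not isinstance(frame_width, int) or not isinstance(frame_height, int):
--             continue
--         if frame_width <= 0 or frame_height <= 0:
--             continue
--         candidates.append(
--             (
--                 (
--                     0 if frame_width == DEFAULT_TEST_RESOLUTION_WIDTH else 1,
--                     abs(frame_width - DEFAULT_TEST_RESOLUTION_WIDTH),
--                     abs(frame_height - DEFAULT_TEST_RESOLUTION_HEIGHT),
--                     -frame_width,
--                     -frame_height,
--                 ),
--                 key,
--                 value,
--             )
--         )
--
--     if not candidates:
--         return None
--
--     candidates.sort(key=lambda item: item[0])
--     _, key, value = candidates[0]
--     return key, value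
-- ===== SOURCE B (Python) =====
-- DEFAULT_TEST_RESOLUTION_WIDTH = 640
--
-- DEFAULT_TEST_RESOLUTION_HEIGHT = 360
--
-- def _select_rgbd_resolution(resolutions: dict) -> tuple[str, dict] | None:
--     """Pick the best available atlas resolution for the current test runtime."""
--     best_key = None
--     best_result = None
--     for key, value in resolutions.items():
--         if not isinstance(key, str) or not isinstance(value, dict):
--             continue
--         frame_width = value.get("frame_width")
--         frame_height = value.get("frame_height")
--         if not isinstance(frame_width, int) or not isinstance(frame_height, int):
--             continue
--         if frame_width <= 0 or frame_height <= 0: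
--             continue
--         k = (
--             0 if frame_width == DEFAULT_TEST_RESOLUTION_WIDTH else 1,
--             abs(frame_width - DEFAULT_TEST_RESOLUTION_WIDTH),
--             abs(frame_height - DEFAULT_TEST_RESOLUTION_HEIGHT),
--             -frame_width,
--             -frame_height,
--         )
--         if best_key is None or k < best_key:
--             best_key = k
--             best_result = (key, value)
--     return best_result
-- ===== Notes on version B (the rewrite author's own statement) =====
-- stated objective: simpler
-- what changed: Replaces the candidates-list accumulation plus stable sort-and-take-first with a single pass keeping a running best key/result pair under strict '<' (first-wins ties, matching the stable sort).
import Mathlib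
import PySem

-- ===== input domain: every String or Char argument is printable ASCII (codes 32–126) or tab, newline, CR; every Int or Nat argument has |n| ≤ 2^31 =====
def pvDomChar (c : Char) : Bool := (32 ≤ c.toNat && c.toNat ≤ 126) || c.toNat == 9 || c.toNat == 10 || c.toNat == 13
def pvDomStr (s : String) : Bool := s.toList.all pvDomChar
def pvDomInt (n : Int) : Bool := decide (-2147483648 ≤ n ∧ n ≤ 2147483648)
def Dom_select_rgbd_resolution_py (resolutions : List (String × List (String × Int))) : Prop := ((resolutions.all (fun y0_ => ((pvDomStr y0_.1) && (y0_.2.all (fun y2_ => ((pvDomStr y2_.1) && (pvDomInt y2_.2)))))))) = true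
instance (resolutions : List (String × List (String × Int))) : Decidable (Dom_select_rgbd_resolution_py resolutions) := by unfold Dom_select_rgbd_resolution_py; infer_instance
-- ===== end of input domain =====

-- B replaces A's candidate-list + stable sort + take-first with a single pass keeping a
-- running best under strict '<' (ties keep the first entry, matching the stable sort).


-- ===== PORT A =====
-- Python's abs on Int
def pvAbs (x : Int) : Int := if x < 0 then -x else x

-- The Python 5-tuple sort key (0/1, |fw-640|, |fh-360|, -fw, -fh), compared lexicographically
-- by Python's tuple '<'. Encoded order-faithfully as ONE Int by base-2^34 positional packing
-- (on Dom each component, shifted to be nonnegative, is < 2^34), since '<' on Lean products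
-- is pointwise, not lexicographic. Used by both ports (both Pythons build the same tuple).
def pvKey (fw fh : Int) : Int :=
  (if fw = 640 then 0 else 1) * 2^136
    + pvAbs (fw - 640) * 2^102
    + pvAbs (fh - 360) * 2^68
    + (2^32 - fw) * 2^34
    + (2^32 - fh)

def select_rgbd_resolution_py (resolutions : List (String × List (String × Int))) : Option (String × (List (String × Int))) :=
  let candidates : List (Int × String × List (String × Int)) :=
    resolutions.foldl (fun acc kv =>
      match (PySem.Dict.mk kv.2).get? "frame_width", (PySem.Dict.mk kv.2).get? "frame_height" with
      | some frame_width, some frame_height =>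
          if frame_width ≤ 0 || frame_height ≤ 0 then acc
          else acc ++ [(pvKey frame_width frame_height, kv.1, kv.2)]
      | _, _ => acc) []
  if candidates = [] then none
  else
    match PySem.List.sorted candidates (fun c => c.1) false with
    | [] => none
    | c :: _ => some (c.2.1, c.2.2)

-- ===== PORT B =====
def select_rgbd_resolution_py_alt (resolutions : List (String × List (String × Int))) : Option (String × (List (String × Int))) :=
  let best := resolutions.foldl (fun best kv =>
      match (PySem.Dict.mk kv.2).get? "frame_width" with
      | none => best
      | some fw =>
        match (PySem.Dict.mk kv.2).get? "frame_height" with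
        | none => best
        | some fh =>
          if fw ≤ 0 || fh ≤ 0 then best
          else
            let k := pvKey fw fh
            match best with
            | none => some (k, (kv.1, kv.2))
            | some (bk, br) => if k < bk then some (k, (kv.1, kv.2)) else some (bk, br)) (none : Option (Int × (String × List (String × Int))))
  best.map (fun b => b.2)

-- ===== PRECONDITION & SPEC =====
def Spec_select_rgbd_resolution_py (resolutions : List (String × List (String × Int))) (out : Option (String × (List (String × Int)))) : Prop := out = select_rgbd_resolution_py_alt resolutions
instance (resolutions : List (String × List (String × Int))) (out : Option (String × (List (String × Int)))) : Decidable (Spec_select_rgbd_resolution_py resolutions out) := by unfold Spec_select_rgbd_resolution_py; infer_instance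

-- ===== CLAIM (what is proved, stated in full; the proofs are below) =====
def Claim_equal_select_rgbd_resolution_py : Prop := ∀ (resolutions : List (String × List (String × Int))), Dom_select_rgbd_resolution_py resolutions → Spec_select_rgbd_resolution_py resolutions (select_rgbd_resolution_py resolutions)

-- ===== LEMMAS AND PROOFS =====

-- one candidate entry (A's guard logic), used only by the proofs
def pvCand (kv : String × List (String × Int)) : Option (Int × String × List (String × Int)) :=
  match (PySem.Dict.mk kv.2).get? "frame_width", (PySem.Dict.mk kv.2).get? "frame_height" with
  | some fw, some fh => if fw ≤ 0 || fh ≤ 0 then none else some (pvKey fw fh, kv.1, kv.2)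
  | _, _ => none

-- B's running-min step, on already-filtered candidates
def pvMinStep (st : Option (Int × String × List (String × Int))) (c : Int × String × List (String × Int)) : Option (Int × String × List (String × Int)) :=
  match st with
  | none => some c
  | some b => if c.1 < b.1 then some c else some b

lemma pvA_fold (rs : List (String × List (String × Int))) (acc : List (Int × String × List (String × Int))) :
    rs.foldl (fun acc kv =>
      match (PySem.Dict.mk kv.2).get? "frame_width", (PySem.Dict.mk kv.2).get? "frame_height" with
      | some frame_width, some frame_height =>
          if frame_width ≤ 0 || frame_height ≤ 0 then acc
          else acc ++ [(pvKey frame_width frame_height, kv.1, kv.2)]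
      | _, _ => acc) acc = acc ++ rs.filterMap pvCand := by
  induction rs generalizing acc with
  | nil => simp
  | cons kv t ih =>
      rw [List.foldl_cons, List.filterMap_cons]
      cases hw : (PySem.Dict.mk kv.2).get? "frame_width" with
      | none =>
          have hc : pvCand kv = none := by simp [pvCand, hw]
          rw [hc]
          exact ih acc
      | some fw =>
        cases hh : (PySem.Dict.mk kv.2).get? "frame_height" with
        | none =>
            have hc : pvCand kv = none := by simp [pvCand, hw, hh]
            rw [hc]
            exact ih acc
        | some fh =>
          by_cases hg : (fw ≤ 0 || fh ≤ 0) = true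
          · have hc : pvCand kv = none := by simp only [pvCand, hw, hh, if_pos hg]
            rw [hc]
            simp only [if_pos hg]
            exact ih acc
          · have hc : pvCand kv = some (pvKey fw fh, kv.1, kv.2) := by
              simp only [pvCand, hw, hh, if_neg hg]
            rw [hc]
            simp only [if_neg hg]
            rw [ih, List.append_assoc]
            rfl

lemma pvB_fold (rs : List (String × List (String × Int))) (st : Option (Int × String × List (String × Int))) :
    rs.foldl (fun best kv =>
      match (PySem.Dict.mk kv.2).get? "frame_width" with
      | none => best
      | some fw =>
        match (PySem.Dict.mk kv.2).get? "frame_height" with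
        | none => best
        | some fh =>
          if fw ≤ 0 || fh ≤ 0 then best
          else
            let k := pvKey fw fh
            match best with
            | none => some (k, (kv.1, kv.2))
            | some (bk, br) => if k < bk then some (k, (kv.1, kv.2)) else some (bk, br)) st
      = (rs.filterMap pvCand).foldl pvMinStep st := by
  induction rs generalizing st with
  | nil => rfl
  | cons kv t ih =>
      rw [List.foldl_cons, List.filterMap_cons]
      cases hw : (PySem.Dict.mk kv.2).get? "frame_width" with
      | none =>
          have hc : pvCand kv = none := by simp [pvCand, hw]
          rw [hc]
          exact ih st
      | some fw =>
        cases hh : (PySem.Dict.mk kv.2).get? "frame_height" with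
        | none =>
            have hc : pvCand kv = none := by simp [pvCand, hw, hh]
            rw [hc]
            exact ih st
        | some fh =>
          by_cases hg : (fw ≤ 0 || fh ≤ 0) = true
          · have hc : pvCand kv = none := by simp only [pvCand, hw, hh, if_pos hg]
            rw [hc]
            simp only [if_pos hg]
            exact ih st
          · have hc : pvCand kv = some (pvKey fw fh, kv.1, kv.2) := by
              simp only [pvCand, hw, hh, if_neg hg]
            rw [hc, List.foldl_cons]
            simp only [if_neg hg]
            have hst : (match st with
                | none => some (pvKey fw fh, (kv.1, kv.2))
                | some (bk, br) => if pvKey fw fh < bk then some (pvKey fw fh, (kv.1, kv.2)) else some (bk, br))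
                = pvMinStep st (pvKey fw fh, kv.1, kv.2) := by
              cases st with
              | none => rfl
              | some b => rcases b with ⟨bk, br⟩; rfl
            rw [hst]
            exact ih _

lemma pvHead_insertBy (x : Int × String × List (String × Int)) (acc : List (Int × String × List (String × Int))) :
    (PySem.List.insertBy (fun a b => decide (a.1 < b.1)) x acc).head? = pvMinStep acc.head? x := by
  cases acc with
  | nil => rfl
  | cons y ys =>
      unfold PySem.List.insertBy pvMinStep
      by_cases h : x.1 < y.1
      · simp [h]
      · simp [h]

lemma pvHead_sortFold (cs : List (Int × String × List (String × Int))) (acc : List (Int × String × List (String × Int))) :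
    (cs.foldl (fun acc x => PySem.List.insertBy (fun a b => decide (a.1 < b.1)) x acc) acc).head?
      = cs.foldl pvMinStep acc.head? := by
  induction cs generalizing acc with
  | nil => rfl
  | cons c t ih => simp only [List.foldl_cons, ih, pvHead_insertBy]

lemma pvMinFold_some_ne_none (l : List (Int × String × List (String × Int))) (b : Int × String × List (String × Int)) :
    l.foldl pvMinStep (some b) ≠ none := by
  induction l generalizing b with
  | nil => intro h; simp at h
  | cons x xs ihl =>
      intro h
      rw [List.foldl_cons] at h
      have hx : pvMinStep (some b) x = if x.1 < b.1 then some x else some b := rfl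
      rw [hx] at h
      by_cases hlt : x.1 < b.1
      · rw [if_pos hlt] at h; exact ihl _ h
      · rw [if_neg hlt] at h; exact ihl _ h

-- ===== VERDICT (by name: the statement is the Claim_ definition above) =====
theorem select_rgbd_resolution_py_spec : Claim_equal_select_rgbd_resolution_py := by
  intro rs _
  show select_rgbd_resolution_py rs = select_rgbd_resolution_py_alt rs
  unfold select_rgbd_resolution_py select_rgbd_resolution_py_alt
  rw [pvA_fold, pvB_fold]
  simp only [List.nil_append]
  have hsorted : PySem.List.sorted (rs.filterMap pvCand) (fun c => c.1) false
      = (rs.filterMap pvCand).foldl (fun acc x => PySem.List.insertBy (fun a b => decide (a.1 < b.1)) x acc) [] := rfl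
  have hhead := pvHead_sortFold (rs.filterMap pvCand) []
  by_cases hnil : rs.filterMap pvCand = []
  · simp [hnil]
  · rw [if_neg hnil, hsorted]
    cases hS : (rs.filterMap pvCand).foldl (fun acc x => PySem.List.insertBy (fun a b => decide (a.1 < b.1)) x acc) [] with
    | nil =>
        exfalso
        rw [hS] at hhead
        obtain ⟨c, t, hct⟩ := List.exists_cons_of_ne_nil hnil
        rw [hct, List.foldl_cons] at hhead
        simp only [List.head?_nil] at hhead
        exact pvMinFold_some_ne_none t _ hhead.symm
    | cons c t =>
        rw [hS] at hhead
        simp only [List.head?_cons, List.head?_nil] at hhead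
        rw [← hhead]
        simp
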